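-- pv_equiv track=rewrite | github.com/thice14/WINC | BE_DEV/PROJECTS/for loops/for loops exercise/for/test.py | alphabet_set
-- ===== SOURCE A (Python) =====
-- import string
--
-- def alphabet_set(countries):
--
--     alphabet_string = string.ascii_lowercase
--
--     alphabet_list = list(alphabet_string)
--
--     alphabet_set_list = []
--
--     for j in countries:
--         for k in j:
--             for i in alphabet_list:
--                 if i == k.lower():
--                     alphabet_list.remove(i)
--                     if j not in alphabet_set_list:
--                         alphabet_set_list.append(j)
--                 continue
--             continue
--         continue
--     return alphabet_set_list
-- ===== SOURCE B (Python) =====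
-- import string
--
-- def alphabet_set(countries):
--     remaining = set(string.ascii_lowercase)
--     result = []
--     for country in countries:
--         matched = {c.lower() for c in country} & remaining
--         if matched:
--             result.append(country)
--             remaining -= matched
--     return result
-- ===== Notes on version B (the rewrite author's own statement) =====
-- stated objective: simpler
-- what changed: A scans the whole remaining-alphabet list for every character and removes letters one at a time with an explicit already-appended check; B keeps a remaining set and, per country, takes one batch set intersection to decide appending and one set difference to consume the letters, with no inner per-letter scan and no dedup check.
import Mathlib
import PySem

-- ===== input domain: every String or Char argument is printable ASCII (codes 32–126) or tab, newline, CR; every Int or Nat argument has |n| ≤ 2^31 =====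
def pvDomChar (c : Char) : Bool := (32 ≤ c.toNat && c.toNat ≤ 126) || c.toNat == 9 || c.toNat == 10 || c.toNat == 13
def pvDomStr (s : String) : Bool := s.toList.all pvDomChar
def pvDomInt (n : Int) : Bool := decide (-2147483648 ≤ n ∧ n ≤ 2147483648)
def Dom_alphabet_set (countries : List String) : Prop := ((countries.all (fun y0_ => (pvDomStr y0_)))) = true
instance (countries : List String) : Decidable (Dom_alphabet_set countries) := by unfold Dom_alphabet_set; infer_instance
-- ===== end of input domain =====

-- B replaces A's per-character scan over a mutating letter list by a per-country batch
-- set intersection/difference (objective: simpler); return values proved equal on all inputs.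

-- ===== PORT A =====
-- Python's inner `for i in alphabet_list` iterates by index over the list while
-- `.remove` mutates it: ported index-faithfully; `alphabet_list.remove(i)` with
-- i = alphabet_list[idx] always succeeds and removes the first occurrence = List.erase.
-- The fuel counter (initial list length, an upper bound on the remaining iterations since
-- idx grows by 1 each step and the list never grows) only makes the recursion structural.
def alphaInnerA (j : String) (k : Char) :
    Nat → Nat → List Char → List String → List Char × List String
  | 0, _, alist, res => (alist, res)
  | fuel + 1, idx, alist, res =>
    if h : idx < alist.length then
      if alist[idx] = PySem.Chars.lowerChar k then
        alphaInnerA j k fuel (idx + 1) (alist.erase alist[idx])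
          (if j ∈ res then res else res ++ [j])
      else alphaInnerA j k fuel (idx + 1) alist res
    else (alist, res)

def alphaCharsA (j : String) : List Char → List Char → List String → List Char × List String
  | [], alist, res => (alist, res)
  | k :: ks, alist, res =>
    let st := alphaInnerA j k alist.length 0 alist res
    alphaCharsA j ks st.1 st.2

def alphabet_set (countries : List String) : List String :=
  (countries.foldl (fun st j => alphaCharsA j j.toList st.1 st.2)
    ("abcdefghijklmnopqrstuvwxyz".toList, [])).2

-- ===== PORT B =====
def alphabet_set_alt (countries : List String) : List String :=
  (countries.foldl
    (fun (st : PySem.Set Char × List String) country =>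
      let matched := PySem.Set.inter
        (PySem.Set.ofList (country.toList.map PySem.Chars.lowerChar)) st.1
      if matched = [] then st
      else (PySem.Set.diff st.1 matched, st.2 ++ [country]))
    (PySem.Set.ofList "abcdefghijklmnopqrstuvwxyz".toList, [])).2

-- ===== PRECONDITION & SPEC =====
def Spec_alphabet_set (countries : List String) (out : List String) : Prop := out = alphabet_set_alt countries
instance (countries : List String) (out : List String) : Decidable (Spec_alphabet_set countries out) := by unfold Spec_alphabet_set; infer_instance

-- ===== CLAIM (what is proved, stated in full; the proofs are below) =====
def Claim_equal_alphabet_set : Prop := ∀ (countries : List String), Dom_alphabet_set countries → Spec_alphabet_set countries (alphabet_set countries)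

-- ===== LEMMAS AND PROOFS =====

lemma alphaInnerA_spec (j : String) (k : Char) :
    ∀ (fuel idx : Nat) (alist : List Char) (res : List String), alist.Nodup →
    PySem.Chars.lowerChar k ∉ alist.take idx → alist.length ≤ fuel + idx →
    alphaInnerA j k fuel idx alist res =
      (alist.erase (PySem.Chars.lowerChar k),
       if PySem.Chars.lowerChar k ∈ alist then
         (if j ∈ res then res else res ++ [j]) else res) := by
  intro fuel
  induction fuel with
  | zero =>
    intro idx alist res hnd htake hlen
    rw [List.take_of_length_le (by omega)] at htake
    rw [alphaInnerA, List.erase_of_not_mem htake, if_neg htake]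
  | succ fuel ih =>
    intro idx alist res hnd htake hlen
    rw [alphaInnerA]
    by_cases h : idx < alist.length
    · rw [dif_pos h]
      by_cases heq : alist[idx] = PySem.Chars.lowerChar k
      · rw [if_pos heq]
        have hmem : PySem.Chars.lowerChar k ∈ alist := heq ▸ alist.getElem_mem h
        have hne : PySem.Chars.lowerChar k ∉ alist.erase alist[idx] := by
          rw [heq]; exact fun hx => ((hnd.mem_erase_iff).1 hx).1 rfl
        have hlen' := List.length_erase_of_mem (alist.getElem_mem h)
        rw [ih (idx + 1) _ _ (hnd.erase _)
          (fun hx => hne (List.mem_of_mem_take hx)) (by omega)]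
        rw [List.erase_of_not_mem hne, if_neg hne, if_pos hmem, heq]
      · rw [if_neg heq]
        apply ih _ _ _ hnd _ (by omega)
        rw [List.take_add_one]
        intro hx
        rcases List.mem_append.1 hx with hx | hx
        · exact htake hx
        · have hg : alist[idx]? = some alist[idx] := List.getElem?_eq_getElem h
          simp only [hg, Option.toList_some, List.mem_singleton] at hx
          exact heq hx.symm
    · rw [dif_neg h]
      rw [List.take_of_length_le (by omega)] at htake
      rw [List.erase_of_not_mem htake, if_neg htake]

lemma alphaCharsA_spec (j : String) :
    ∀ ks alist res, alist.Nodup →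
    alphaCharsA j ks alist res =
      (alist.filter (fun a => a ∉ ks.map PySem.Chars.lowerChar),
       if (∃ k ∈ ks, PySem.Chars.lowerChar k ∈ alist) ∧ j ∉ res
       then res ++ [j] else res) := by
  intro ks
  induction ks with
  | nil => intro alist res hnd; simp [alphaCharsA]
  | cons k ks ih =>
    intro alist res hnd
    rw [alphaCharsA, alphaInnerA_spec j k alist.length 0 alist res hnd (by simp) (by omega)]
    rw [ih _ _ (hnd.erase _)]
    set lk := PySem.Chars.lowerChar k with hlk
    dsimp only
    rw [Prod.mk.injEq]
    refine ⟨?_, ?_⟩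
    ·
      rw [hnd.erase_eq_filter lk, List.filter_filter]
      apply List.filter_congr
      intro a _
      by_cases h1 : a = PySem.Chars.lowerChar k <;>
        by_cases h2 : a ∈ List.map PySem.Chars.lowerChar ks <;>
          simp [h1, h2, hlk]
    · by_cases hm : lk ∈ alist
      · have hm' : PySem.Chars.lowerChar k ∈ alist := hm
        by_cases hj : j ∈ res
        · simp [hm, hj]
        · have hj' : j ∈ res ++ [j] := by simp
          simp [hm, hm', hj, hj']
      · rw [List.erase_of_not_mem hm, if_neg hm]
        have : (∃ k' ∈ k :: ks, PySem.Chars.lowerChar k' ∈ alist) ↔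
            (∃ k' ∈ ks, PySem.Chars.lowerChar k' ∈ alist) := by
          simp only [List.mem_cons]
          constructor
          · rintro ⟨k', hk', hmem⟩
            rcases hk' with rfl | hk'
            · exact absurd hmem hm
            · exact ⟨k', hk', hmem⟩
          · rintro ⟨k', hk', hmem⟩; exact ⟨k', Or.inr hk', hmem⟩
        rw [if_congr (and_congr_left (fun _ => this)) rfl rfl]

lemma main_fold :
    ∀ (countries : List String) (alist : List Char) (res : List String),
      alist.Nodup →
      (∀ s ∈ res, ∀ c ∈ s.toList, PySem.Chars.lowerChar c ∉ alist) →
      countries.foldl (fun st j => alphaCharsA j j.toList st.1 st.2) (alist, res) =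
      countries.foldl
        (fun (st : PySem.Set Char × List String) country =>
          let matched := PySem.Set.inter
            (PySem.Set.ofList (country.toList.map PySem.Chars.lowerChar)) st.1
          if matched = [] then st
          else (PySem.Set.diff st.1 matched, st.2 ++ [country])) (alist, res) := by
  intro countries
  induction countries with
  | nil => intro alist res _ _; rfl
  | cons j cs ih =>
    intro alist res hnd hinv
    simp only [List.foldl_cons]
    rw [alphaCharsA_spec j j.toList alist res hnd]
    set lows := j.toList.map PySem.Chars.lowerChar with hlows
    set matched := PySem.Set.inter (PySem.Set.ofList lows) alist with hmat
    have hmatched_mem : ∀ a, a ∈ matched ↔ a ∈ lows ∧ a ∈ alist := by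
      intro a
      simp [hmat, PySem.Set.inter, List.mem_filter, PySem.Set.mem_ofList,
        PySem.Set.contains]
    by_cases hE : ∃ c ∈ j.toList, PySem.Chars.lowerChar c ∈ alist
    · have hmne : matched ≠ [] := by
        rcases hE with ⟨c, hc, hmem⟩
        intro h0
        have : PySem.Chars.lowerChar c ∈ matched :=
          (hmatched_mem _).2 ⟨List.mem_map_of_mem hc, hmem⟩
        simp [h0] at this
      have hjres : j ∉ res := by
        intro hj
        rcases hE with ⟨c, hc, hmem⟩
        exact hinv j hj c hc hmem
      have hfilter : PySem.Set.diff alist matched =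
          alist.filter (fun a => a ∉ lows) := by
        apply List.filter_congr
        intro a ha
        have hiff : a ∈ matched ↔ a ∈ lows := by
          rw [hmatched_mem a]; simp [ha]
        simp [hiff]
      simp only [if_neg hmne, if_pos (And.intro hE hjres), hfilter]
      apply ih
      · exact hnd.filter _
      · intro s hs c hc hmem
        have hmem' := List.mem_filter.1 hmem
        rcases List.mem_append.1 hs with hs | hs
        · exact hinv s hs c hc hmem'.1
        · simp only [List.mem_singleton] at hs
          subst hs
          have : PySem.Chars.lowerChar c ∈ lows := List.mem_map_of_mem hc
          simp [this] at hmem'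
    · have hmeq : matched = [] := by
        rw [List.eq_nil_iff_forall_not_mem]
        intro a ha
        rw [hmatched_mem a] at ha
        rcases ha with ⟨ha1, ha2⟩
        rcases List.mem_map.1 ha1 with ⟨c, hc, rfl⟩
        exact hE ⟨c, hc, ha2⟩
      have hfe : alist.filter (fun a => a ∉ lows) = alist := by
        apply List.filter_eq_self.2
        intro a ha
        simp only [decide_eq_true_eq]
        intro hal
        rcases List.mem_map.1 hal with ⟨c, hc, rfl⟩
        exact hE ⟨c, hc, ha⟩
      simp only [if_pos hmeq, if_neg (fun h : _ ∧ _ => hE h.1), hfe]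
      exact ih alist res hnd hinv

-- ===== VERDICT (by name: the statement is the Claim_ definition above) =====
theorem alphabet_set_spec : Claim_equal_alphabet_set := by
  intro countries _
  unfold Spec_alphabet_set alphabet_set alphabet_set_alt
  have h0 : PySem.Set.ofList "abcdefghijklmnopqrstuvwxyz".toList
      = "abcdefghijklmnopqrstuvwxyz".toList := by decide
  rw [h0, main_fold countries _ [] (by decide) (by simp)]
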